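-- pv_equiv track=rewrite | github.com/BooleanCube/CP | kattis/birthdayparty.py | dfs
-- ===== SOURCE A (Python) =====
-- def dfs(m, p):
--     s = []
--     v = set()
--     s.append(0)
--     while s:
--         x = s.pop(-1)
--         c = x
--         if c in v: continue
--         v.add(c)
--         for ch in m[c]:
--             if ch in v: continue
--             s.append(ch)
--     return len(v) == p
-- ===== SOURCE B (Python) =====
-- def dfs(m, p):
--     v = {0}
--     frontier = [0]
--     while frontier:
--         frontier = [ch for x in frontier for ch in m[x] if ch not in v]
--         v.update(frontier)
--     return len(v) == p
-- ===== Notes on version B (the rewrite author's own statement) =====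
-- stated objective: alternative
-- what changed: Replaced the explicit-stack DFS with per-pop visited checks by a level-synchronous frontier BFS: each round a comprehension builds the whole next layer of unvisited children and unions it into the visited set; the visited SET (hence len(v)==p) is the same.
import Mathlib
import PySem

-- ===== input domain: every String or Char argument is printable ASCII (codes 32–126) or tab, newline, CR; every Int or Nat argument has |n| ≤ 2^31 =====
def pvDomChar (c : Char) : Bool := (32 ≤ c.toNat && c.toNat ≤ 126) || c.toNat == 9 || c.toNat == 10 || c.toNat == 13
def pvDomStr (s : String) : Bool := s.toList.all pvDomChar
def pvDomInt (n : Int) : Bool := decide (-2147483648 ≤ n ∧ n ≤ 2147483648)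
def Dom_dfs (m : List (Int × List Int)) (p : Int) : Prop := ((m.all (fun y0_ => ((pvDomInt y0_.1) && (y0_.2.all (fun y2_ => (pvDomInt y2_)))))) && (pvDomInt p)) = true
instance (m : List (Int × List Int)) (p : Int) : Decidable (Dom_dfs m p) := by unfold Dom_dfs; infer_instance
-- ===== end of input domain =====

-- B replaces A's explicit-stack DFS by a level-synchronous frontier BFS computing the same visited set (objective: alternative traversal, same cost).


-- shared dict-indexing primitive: m[c]; Python raises KeyError when c is not a key —
-- Pre_dfs excludes exactly those inputs, so the [] default is never taken inside Pre_
def pvAdj (m : List (Int × List Int)) (c : Int) : List Int :=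
  (PySem.Dict.get? (PySem.Dict.mk m) c).getD []

-- finite universe of every node the algorithms can ever visit (0 plus all listed children); used only as a fuel bound
def pvUniv (m : List (Int × List Int)) : List Int :=
  PySem.Set.ofList (0 :: m.flatMap (fun kv => kv.2))

-- termination potential of A's stack loop (strictly decreases each iteration); fuel bound only
def pvPot (m : List (Int × List Int)) (s : List Int) (v : List Int) : Nat :=
  s.length + (((pvUniv m).filter (fun x => !(PySem.Set.contains v x))).map (fun x => 1 + (pvAdj m x).length)).sum

def pvFuelA (m : List (Int × List Int)) : Nat := pvPot m [0] PySem.Set.empty + 1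
def pvFuelB (m : List (Int × List Int)) : Nat := (pvUniv m).length + 2

-- ===== PORT A =====
-- stack held top-first (Python appends children then pops the last, so pushed children go on reversed);
-- the fuel argument is only a totality guard, proved sufficient below
def dfsLoop (m : List (Int × List Int)) : Nat → List Int → PySem.Set Int → PySem.Set Int
  | 0, _, v => v
  | _ + 1, [], v => v
  | fuel + 1, x :: s, v =>
      if PySem.Set.contains v x then dfsLoop m fuel s v
      else dfsLoop m fuel
        ((((pvAdj m x).filter (fun ch => !(PySem.Set.contains v ch))).reverse) ++ s)
        (PySem.Set.add v x)

def dfs (m : List (Int × List Int)) (p : Int) : Bool :=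
  PySem.Set.len (dfsLoop m (pvFuelA m) [0] PySem.Set.empty) == p

-- ===== PORT B =====
-- the next frontier: every not-yet-visited child of the current frontier (duplicates kept, as in the comprehension)
def bfsRound (m : List (Int × List Int)) (f : List Int) (v : PySem.Set Int) : List Int :=
  f.flatMap (fun x => (pvAdj m x).filter (fun ch => !(PySem.Set.contains v ch)))

def bfsLoop (m : List (Int × List Int)) : Nat → List Int → PySem.Set Int → PySem.Set Int
  | 0, _, v => v
  | _ + 1, [], v => v
  | fuel + 1, x :: f, v =>
      let f' := bfsRound m (x :: f) v
      bfsLoop m fuel f' (PySem.Set.update v f')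

def dfs_alt (m : List (Int × List Int)) (p : Int) : Bool :=
  PySem.Set.len (bfsLoop m (pvFuelB m) [0] (PySem.Set.ofList [0])) == p

-- ===== PRECONDITION & SPEC =====
-- the nodes reachable from 0 continuing only through keys of m: one closure round adds the children of
-- every keyed member; m.length rounds reach the fixpoint (any reachable node lies behind at most
-- m.length distinct keys).  This is a plain graph-theoretic closure on the input, not either port's loop.
def pvReachIter (m : List (Int × List Int)) : Nat → List Int
  | 0 => [0]
  | n + 1 =>
      let C := pvReachIter m n
      PySem.Set.update C (m.flatMap (fun kv => if kv.1 ∈ C then kv.2 else []))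

-- A raises KeyError exactly when it pops a node that is not a key of m, i.e. when some node reachable
-- from 0 is unkeyed; Pre_dfs excludes exactly those inputs.
def Pre_dfs (m : List (Int × List Int)) (p : Int) : Prop :=
  ∀ x ∈ pvReachIter m m.length, PySem.Dict.contains (PySem.Dict.mk m) x = true
instance (m : List (Int × List Int)) (p : Int) : Decidable (Pre_dfs m p) := by
  unfold Pre_dfs; infer_instance

def pvWitness_dfs : (List (Int × List Int)) × Int := ([(0, [1]), (1, [])], 2)

def Spec_dfs (m : List (Int × List Int)) (p : Int) (out : Bool) : Prop := out = dfs_alt m p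
instance (m : List (Int × List Int)) (p : Int) (out : Bool) : Decidable (Spec_dfs m p out) := by
  unfold Spec_dfs; infer_instance

-- ===== CLAIM (what is proved, stated in full; the proofs are below) =====
def Claim_equal_dfs : Prop := ∀ (m : List (Int × List Int)) (p : Int), Dom_dfs m p → Pre_dfs m p → Spec_dfs m p (dfs m p)

-- ===== LEMMAS AND PROOFS =====

-- a visited list closed under the adjacency function
def pvClosed (m : List (Int × List Int)) (v : List Int) : Prop :=
  ∀ x ∈ v, ∀ ch ∈ pvAdj m x, ch ∈ v

lemma mem_univ_of_mem_adj (m : List (Int × List Int)) (c ch : Int) (h : ch ∈ pvAdj m c) :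
    ch ∈ pvUniv m := by
  unfold pvAdj at h
  cases hg : PySem.Dict.get? (PySem.Dict.mk m) c with
  | none => rw [hg] at h; simp at h
  | some l =>
      rw [hg] at h
      simp only [Option.getD_some] at h
      have hm : (c, l) ∈ m := PySem.Dict.mem_items_of_get?_eq_some (PySem.Dict.mk m) hg
      unfold pvUniv
      rw [PySem.Set.mem_ofList]
      exact List.mem_cons_of_mem _ (List.mem_flatMap.mpr ⟨(c, l), hm, h⟩)

lemma zero_mem_univ (m : List (Int × List Int)) : (0 : Int) ∈ pvUniv m := by
  unfold pvUniv
  rw [PySem.Set.mem_ofList]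
  exact List.mem_cons_self

lemma univ_nodup (m : List (Int × List Int)) : (pvUniv m).Nodup :=
  PySem.Set.nodup_ofList _

-- ---- A side ----
lemma dfsLoop_nodup (m : List (Int × List Int)) :
    ∀ (fuel : Nat) (s : List Int) (v : PySem.Set Int), v.Nodup → (dfsLoop m fuel s v).Nodup := by
  intro fuel
  induction fuel with
  | zero => intro s v hv; simpa [dfsLoop] using hv
  | succ fuel ih =>
      intro s v hv
      cases s with
      | nil => simpa [dfsLoop] using hv
      | cons x s =>
          simp only [dfsLoop]
          split
          · exact ih _ _ hv
          · exact ih _ _ (PySem.Set.nodup_add v x hv)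

lemma dfsLoop_mono (m : List (Int × List Int)) :
    ∀ (fuel : Nat) (s : List Int) (v : PySem.Set Int), ∀ y ∈ v, y ∈ dfsLoop m fuel s v := by
  intro fuel
  induction fuel with
  | zero => intro s v y hy; simpa [dfsLoop] using hy
  | succ fuel ih =>
      intro s v y hy
      cases s with
      | nil => simpa [dfsLoop] using hy
      | cons x s =>
          simp only [dfsLoop]
          split
          · exact ih _ _ y hy
          · exact ih _ _ y ((PySem.Set.mem_add v x y).mpr (Or.inl hy))

lemma dfsLoop_min (m : List (Int × List Int)) :
    ∀ (fuel : Nat) (s : List Int) (v : PySem.Set Int) (C : List Int),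
      (∀ y ∈ s, y ∈ C) → (∀ y ∈ v, y ∈ C) → pvClosed m C →
      ∀ y ∈ dfsLoop m fuel s v, y ∈ C := by
  intro fuel
  induction fuel with
  | zero => intro s v C _ hv _ y hy; exact hv y (by simpa [dfsLoop] using hy)
  | succ fuel ih =>
      intro s v C hs hv hC y hy
      cases s with
      | nil => exact hv y (by simpa [dfsLoop] using hy)
      | cons x s =>
          simp only [dfsLoop] at hy
          split at hy
          · exact ih _ _ C (fun z hz => hs z (List.mem_cons_of_mem _ hz)) hv hC y hy
          · refine ih _ _ C ?_ ?_ hC y hy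
            · intro z hz
              rcases List.mem_append.mp hz with hz | hz
              · have hz' := List.mem_reverse.mp hz
                have := List.mem_filter.mp hz'
                exact hC x (hs x List.mem_cons_self) z this.1
              · exact hs z (List.mem_cons_of_mem _ hz)
            · intro z hz
              rcases (PySem.Set.mem_add v x z).mp hz with hz | hz
              · exact hv z hz
              · subst hz; exact hs z List.mem_cons_self

lemma sum_filter_split_aux (w : Int → Nat) :
    ∀ (U : List Int), U.Nodup → ∀ (v : List Int) (x : Int), x ∈ U → x ∉ v →
      ((U.filter (fun y => !(PySem.Set.contains v y))).map w).sum
        = w x + ((U.filter (fun y => !(PySem.Set.contains (PySem.Set.add v x) y))).map w).sum := by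
  intro U
  induction U with
  | nil => intro _ v x hx; exact absurd hx (List.not_mem_nil)
  | cons u U ih =>
      intro hnd v x hxU hxv
      have hnd' := (List.nodup_cons.mp hnd).2
      have hu_notin := (List.nodup_cons.mp hnd).1
      by_cases hux : u = x
      · subst hux
        have h1 : (!(PySem.Set.contains v u)) = true := by simp [hxv]
        have h2 : ¬ ((!(PySem.Set.contains (PySem.Set.add v u) u)) = true) := by
          simp [(PySem.Set.mem_add v u u).mpr (Or.inr rfl)]
        simp only [List.filter_cons]
        rw [if_pos h1, if_neg h2]
        simp only [List.map_cons, List.sum_cons]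
        congr 1
        have hfeq : U.filter (fun y => !(PySem.Set.contains v y))
            = U.filter (fun y => !(PySem.Set.contains (PySem.Set.add v u) y)) := by
          apply List.filter_congr
          intro y hy
          have hyu : ¬ y = u := fun h => hu_notin (h ▸ hy)
          simp [PySem.Set.mem_add, hyu]
        rw [hfeq]
      · have hxU' : x ∈ U := by
          rcases List.mem_cons.mp hxU with h | h
          · exact absurd h.symm hux
          · exact h
        have hceq : (!(PySem.Set.contains (PySem.Set.add v x) u)) = (!(PySem.Set.contains v u)) := by
          simp [PySem.Set.mem_add, hux]
        have ihu := ih hnd' v x hxU' hxv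
        simp only [List.filter_cons]
        by_cases hcu : (!(PySem.Set.contains v u)) = true
        · rw [if_pos hcu, if_pos (hceq ▸ hcu)]
          simp only [List.map_cons, List.sum_cons]
          omega
        · rw [if_neg hcu, if_neg (fun h => hcu (hceq ▸ h))]
          exact ihu

lemma sum_filter_split (m : List (Int × List Int)) (v : List Int) (x : Int)
    (hxU : x ∈ pvUniv m) (hxv : x ∉ v) :
    (((pvUniv m).filter (fun y => !(PySem.Set.contains v y))).map
        (fun y => 1 + (pvAdj m y).length)).sum
      = (1 + (pvAdj m x).length) +
        (((pvUniv m).filter (fun y => !(PySem.Set.contains (PySem.Set.add v x) y))).map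
          (fun y => 1 + (pvAdj m y).length)).sum :=
  sum_filter_split_aux _ (pvUniv m) (univ_nodup m) v x hxU hxv

lemma dfsLoop_complete (m : List (Int × List Int)) :
    ∀ (fuel : Nat) (s : List Int) (v : PySem.Set Int),
      (∀ x ∈ v, ∀ ch ∈ pvAdj m x, ch ∈ v ∨ ch ∈ s) →
      (∀ y ∈ s, y ∈ pvUniv m) → v.Nodup →
      pvPot m s v < fuel →
      (∀ y ∈ s, y ∈ dfsLoop m fuel s v) ∧ pvClosed m (dfsLoop m fuel s v) := by
  intro fuel
  induction fuel with
  | zero => intro s v _ _ _ hpot; exact absurd hpot (Nat.not_lt_zero _)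
  | succ fuel ih =>
      intro s v hinv hsU hnd hpot
      cases s with
      | nil =>
          refine ⟨by simp, ?_⟩
          intro x hx ch hch
          simpa [dfsLoop] using (hinv x (by simpa [dfsLoop] using hx) ch hch).resolve_right
            (List.not_mem_nil)
      | cons x s =>
          simp only [dfsLoop]
          by_cases hx : x ∈ v
          · rw [if_pos ((PySem.Set.contains_iff v x).mpr hx)]
            have hinv' : ∀ z ∈ v, ∀ ch ∈ pvAdj m z, ch ∈ v ∨ ch ∈ s := by
              intro z hz ch hch
              rcases hinv z hz ch hch with h | h
              · exact Or.inl h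
              · rcases List.mem_cons.mp h with h | h
                · exact Or.inl (h ▸ hx)
                · exact Or.inr h
            have hpot' : pvPot m s v < fuel := by
              unfold pvPot at hpot ⊢
              simp only [List.length_cons] at hpot
              omega
            have hrec := ih s v hinv' (fun y hy => hsU y (List.mem_cons_of_mem _ hy)) hnd hpot'
            exact ⟨fun y hy => by
              rcases List.mem_cons.mp hy with h | h
              · exact h ▸ dfsLoop_mono m fuel s v x hx
              · exact hrec.1 y h, hrec.2⟩
          · rw [if_neg (fun hc => hx ((PySem.Set.contains_iff v x).mp hc))]
            set s' := ((pvAdj m x).filter (fun ch => !(PySem.Set.contains v ch))).reverse ++ s with hs'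
            set v' := PySem.Set.add v x with hv'
            have hinv' : ∀ z ∈ v', ∀ ch ∈ pvAdj m z, ch ∈ v' ∨ ch ∈ s' := by
              intro z hz ch hch
              rcases (PySem.Set.mem_add v x z).mp hz with hz | hz
              · rcases hinv z hz ch hch with h | h
                · exact Or.inl ((PySem.Set.mem_add v x ch).mpr (Or.inl h))
                · rcases List.mem_cons.mp h with h | h
                  · exact Or.inl ((PySem.Set.mem_add v x ch).mpr (Or.inr h))
                  · exact Or.inr (List.mem_append.mpr (Or.inr h))
              · subst hz
                by_cases hcv : ch ∈ v
                · exact Or.inl ((PySem.Set.mem_add v z ch).mpr (Or.inl hcv))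
                · refine Or.inr (List.mem_append.mpr (Or.inl ?_))
                  rw [List.mem_reverse]
                  exact List.mem_filter.mpr ⟨hch, by simp [hcv]⟩
            have hsU' : ∀ y ∈ s', y ∈ pvUniv m := by
              intro y hy
              rcases List.mem_append.mp hy with h | h
              · exact mem_univ_of_mem_adj m x y (List.mem_filter.mp (List.mem_reverse.mp h)).1
              · exact hsU y (List.mem_cons_of_mem _ h)
            have hnd' : v'.Nodup := PySem.Set.nodup_add v x hnd
            have hpot' : pvPot m s' v' < fuel := by
              have hsplit := sum_filter_split m v x (hsU x List.mem_cons_self) hx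
              have hlf : ((pvAdj m x).filter (fun ch => !(PySem.Set.contains v ch))).length
                  ≤ (pvAdj m x).length := List.length_filter_le _ _
              unfold pvPot at hpot ⊢
              rw [hsplit] at hpot
              simp only [hs', hv', List.length_append, List.length_reverse, List.length_cons]
                at hpot ⊢
              omega
            have hrec := ih s' v' hinv' hsU' hnd' hpot'
            refine ⟨?_, hrec.2⟩
            intro y hy
            rcases List.mem_cons.mp hy with h | h
            · exact h ▸ dfsLoop_mono m fuel s' v' x ((PySem.Set.mem_add v x x).mpr (Or.inr rfl))
            · exact hrec.1 y (List.mem_append.mpr (Or.inr h))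

-- ---- B side ----
lemma bfsLoop_nodup (m : List (Int × List Int)) :
    ∀ (fuel : Nat) (f : List Int) (v : PySem.Set Int), v.Nodup → (bfsLoop m fuel f v).Nodup := by
  intro fuel
  induction fuel with
  | zero => intro f v hv; simpa [bfsLoop] using hv
  | succ fuel ih =>
      intro f v hv
      cases f with
      | nil => simpa [bfsLoop] using hv
      | cons x f => exact ih _ _ (PySem.Set.nodup_update v _ hv)

lemma bfsLoop_mono (m : List (Int × List Int)) :
    ∀ (fuel : Nat) (f : List Int) (v : PySem.Set Int), ∀ y ∈ v, y ∈ bfsLoop m fuel f v := by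
  intro fuel
  induction fuel with
  | zero => intro f v y hy; simpa [bfsLoop] using hy
  | succ fuel ih =>
      intro f v y hy
      cases f with
      | nil => simpa [bfsLoop] using hy
      | cons x f =>
          exact ih _ _ y ((PySem.Set.mem_update v _ y).mpr (Or.inl hy))

lemma bfsLoop_min (m : List (Int × List Int)) :
    ∀ (fuel : Nat) (f : List Int) (v : PySem.Set Int) (C : List Int),
      (∀ y ∈ f, y ∈ C) → (∀ y ∈ v, y ∈ C) → pvClosed m C →
      ∀ y ∈ bfsLoop m fuel f v, y ∈ C := by
  intro fuel
  induction fuel with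
  | zero => intro f v C _ hv _ y hy; exact hv y (by simpa [bfsLoop] using hy)
  | succ fuel ih =>
      intro f v C hf hv hC y hy
      cases f with
      | nil => exact hv y (by simpa [bfsLoop] using hy)
      | cons x f =>
          simp only [bfsLoop] at hy
          have hf' : ∀ z ∈ bfsRound m (x :: f) v, z ∈ C := by
            intro z hz
            rcases List.mem_flatMap.mp hz with ⟨x', hx', hz'⟩
            exact hC x' (hf x' hx') z (List.mem_filter.mp hz').1
          refine ih _ _ C hf' ?_ hC y hy
          intro z hz
          rcases (PySem.Set.mem_update v _ z).mp hz with h | h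
          · exact hv z h
          · exact hf' z h

lemma filterlen_le (v v' : List Int) (hsub : ∀ y ∈ v, y ∈ v') :
    ∀ (U : List Int),
      (U.filter (fun x => !(PySem.Set.contains v' x))).length
        ≤ (U.filter (fun x => !(PySem.Set.contains v x))).length := by
  intro U
  induction U with
  | nil => simp
  | cons u U ih =>
      simp only [List.filter_cons]
      by_cases hu : u ∈ v
      · rw [if_neg (by simp [hu] : ¬ ((!(PySem.Set.contains v u)) = true)),
          if_neg (by simp [hsub u hu] : ¬ ((!(PySem.Set.contains v' u)) = true))]
        exact ih
      · rw [if_pos (by simp [hu] : (!(PySem.Set.contains v u)) = true)]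
        by_cases hu' : u ∈ v'
        · rw [if_neg (by simp [hu'] : ¬ ((!(PySem.Set.contains v' u)) = true))]
          simp only [List.length_cons]
          omega
        · rw [if_pos (by simp [hu'] : (!(PySem.Set.contains v' u)) = true)]
          simp only [List.length_cons]
          omega

lemma filterlen_lt (U : List Int) (v v' : List Int)
    (hsub : ∀ y ∈ v, y ∈ v') (y0 : Int) (hyU : y0 ∈ U) (hyv : y0 ∉ v) (hyv' : y0 ∈ v') :
    (U.filter (fun x => !(PySem.Set.contains v' x))).length
      < (U.filter (fun x => !(PySem.Set.contains v x))).length := by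
  induction U with
  | nil => exact absurd hyU (List.not_mem_nil)
  | cons u U ih =>
      simp only [List.filter_cons]
      by_cases huy : u = y0
      · subst huy
        rw [if_pos (by simp [hyv] : (!(PySem.Set.contains v u)) = true),
          if_neg (by simp [hyv'] : ¬ ((!(PySem.Set.contains v' u)) = true))]
        exact Nat.lt_succ_of_le (filterlen_le v v' hsub U)
      · have hyU' : y0 ∈ U := by
          rcases List.mem_cons.mp hyU with h | h
          · exact absurd h.symm huy
          · exact h
        have hlt := ih hyU'
        by_cases hu : u ∈ v
        · rw [if_neg (by simp [hu] : ¬ ((!(PySem.Set.contains v u)) = true)),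
            if_neg (by simp [hsub u hu] : ¬ ((!(PySem.Set.contains v' u)) = true))]
          exact hlt
        · rw [if_pos (by simp [hu] : (!(PySem.Set.contains v u)) = true)]
          by_cases hu' : u ∈ v'
          · rw [if_neg (by simp [hu'] : ¬ ((!(PySem.Set.contains v' u)) = true))]
            simp only [List.length_cons]
            omega
          · rw [if_pos (by simp [hu'] : (!(PySem.Set.contains v' u)) = true)]
            simp only [List.length_cons]
            omega

lemma bfsLoop_complete (m : List (Int × List Int)) :
    ∀ (fuel : Nat) (f : List Int) (v : PySem.Set Int),
      (∀ x ∈ f, x ∈ v) →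
      (∀ x ∈ v, x ∉ f → ∀ ch ∈ pvAdj m x, ch ∈ v) →
      ((pvUniv m).filter (fun x => !(PySem.Set.contains v x))).length + 2 ≤ fuel →
      pvClosed m (bfsLoop m fuel f v) := by
  intro fuel
  induction fuel with
  | zero => intro f v _ _ hfuel; omega
  | succ fuel ih =>
      intro f v hfv hinv hfuel
      cases f with
      | nil =>
          intro x hx ch hch
          simp only [bfsLoop] at hx ⊢
          exact hinv x hx (List.not_mem_nil) ch hch
      | cons x f =>
          simp only [bfsLoop]
          set f' := bfsRound m (x :: f) v with hf'def
          set v' := PySem.Set.update v f' with hv'def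
          have hfv' : ∀ z ∈ f', z ∈ v' := fun z hz => (PySem.Set.mem_update v f' z).mpr (Or.inr hz)
          have hvv' : ∀ z ∈ v, z ∈ v' := fun z hz => (PySem.Set.mem_update v f' z).mpr (Or.inl hz)
          have hinv' : ∀ z ∈ v', z ∉ f' → ∀ ch ∈ pvAdj m z, ch ∈ v' := by
            intro z hz hznf ch hch
            rcases (PySem.Set.mem_update v f' z).mp hz with hz | hz
            · by_cases hzf : z ∈ x :: f
              · by_cases hcv : ch ∈ v
                · exact hvv' ch hcv
                · exact hfv' ch (List.mem_flatMap.mpr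
                    ⟨z, hzf, List.mem_filter.mpr ⟨hch, by simp [hcv]⟩⟩)
              · exact hvv' ch (hinv z hz hzf ch hch)
            · exact absurd hz hznf
          by_cases hfe : f' = []
          · -- the round added nothing: the next iteration exits and v is already closed
            have hveq : v' = v := by rw [hv'def, hfe]; rfl
            rw [hfe, hveq]
            cases fuel with
            | zero => omega
            | succ fuel' =>
                intro z hz ch hch
                simp only [bfsLoop] at hz ⊢
                by_cases hzf : z ∈ x :: f
                · by_cases hcv : ch ∈ v
                  · exact hcv
                  · exfalso
                    have hchf : ch ∈ f' := List.mem_flatMap.mpr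
                      ⟨z, hzf, List.mem_filter.mpr ⟨hch, by simp [hcv]⟩⟩
                    rw [hfe] at hchf
                    exact List.not_mem_nil hchf
                · exact hinv z hz hzf ch hch
          · rcases List.exists_mem_of_ne_nil f' hfe with ⟨y0, hy0⟩
            rcases List.mem_flatMap.mp hy0 with ⟨x', hx', hy0'⟩
            have hy0U : y0 ∈ pvUniv m := mem_univ_of_mem_adj m x' y0 (List.mem_filter.mp hy0').1
            have hy0nv : y0 ∉ v := by
              have h2 := (List.mem_filter.mp hy0').2
              intro hc
              rw [(PySem.Set.contains_iff v y0).mpr hc] at h2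
              simp at h2
            have hy0v' : y0 ∈ v' := hfv' y0 hy0
            have hlt := filterlen_lt (pvUniv m) v v' hvv' y0 hy0U hy0nv hy0v'
            exact ih f' v' hfv' hinv' (by omega)

-- ===== VERDICT (by name: the statement is the Claim_ definition above) =====
theorem dfs_spec : Claim_equal_dfs := by
  intro m p _ _
  unfold Spec_dfs
  have hA := dfsLoop_complete m (pvFuelA m) [0] PySem.Set.empty
    (by intro x hx _ _; simp [PySem.Set.empty] at hx)
    (by intro y hy; rcases List.mem_cons.mp hy with h | h
        · exact h ▸ zero_mem_univ m
        · simp at h)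
    (by simp [PySem.Set.empty])
    (by unfold pvFuelA; omega)
  have h0A : (0 : Int) ∈ dfsLoop m (pvFuelA m) [0] PySem.Set.empty :=
    hA.1 0 List.mem_cons_self
  have hndA : (dfsLoop m (pvFuelA m) [0] PySem.Set.empty).Nodup :=
    dfsLoop_nodup m _ _ _ (by simp [PySem.Set.empty])
  have hB := bfsLoop_complete m (pvFuelB m) [0] (PySem.Set.ofList [0])
    (by intro x hx; rcases List.mem_cons.mp hx with h | h
        · exact h ▸ (PySem.Set.mem_ofList _ _).mpr List.mem_cons_self
        · simp at h)
    (by intro x hx hnx _ _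
        exfalso
        have := (PySem.Set.mem_ofList _ _).mp hx
        rcases List.mem_cons.mp this with h | h
        · exact hnx (h ▸ List.mem_cons_self)
        · simp at h)
    (by have := List.length_filter_le (fun x => !(PySem.Set.contains (PySem.Set.ofList [(0:Int)]) x)) (pvUniv m)
        unfold pvFuelB; omega)
  have h0B : (0 : Int) ∈ bfsLoop m (pvFuelB m) [0] (PySem.Set.ofList [0]) :=
    bfsLoop_mono m _ _ _ 0 ((PySem.Set.mem_ofList _ _).mpr List.mem_cons_self)
  have hndB : (bfsLoop m (pvFuelB m) [0] (PySem.Set.ofList [0])).Nodup :=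
    bfsLoop_nodup m _ _ _ (PySem.Set.nodup_ofList _)
  have hsubAB : ∀ y ∈ dfsLoop m (pvFuelA m) [0] PySem.Set.empty,
      y ∈ bfsLoop m (pvFuelB m) [0] (PySem.Set.ofList [0]) := by
    refine dfsLoop_min m _ _ _ _ ?_ ?_ hB
    · intro y hy; rcases List.mem_cons.mp hy with h | h
      · exact h ▸ h0B
      · simp at h
    · intro y hy; simp [PySem.Set.empty] at hy
  have hsubBA : ∀ y ∈ bfsLoop m (pvFuelB m) [0] (PySem.Set.ofList [0]),
      y ∈ dfsLoop m (pvFuelA m) [0] PySem.Set.empty := by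
    refine bfsLoop_min m _ _ _ _ ?_ ?_ hA.2
    · intro y hy; rcases List.mem_cons.mp hy with h | h
      · exact h ▸ h0A
      · simp at h
    · intro y hy
      have := (PySem.Set.mem_ofList _ _).mp hy
      rcases List.mem_cons.mp this with h | h
      · exact h ▸ h0A
      · simp at h
  have hperm : (dfsLoop m (pvFuelA m) [0] PySem.Set.empty).Perm
      (bfsLoop m (pvFuelB m) [0] (PySem.Set.ofList [0])) :=
    (List.perm_ext_iff_of_nodup hndA hndB).mpr (fun a => ⟨hsubAB a, hsubBA a⟩)
  have hlen := hperm.length_eq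
  simp only [dfs, dfs_alt, PySem.Set.len]
  rw [hlen]
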